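-- pv_equiv track=rewrite | github.com/HanzoRazer/luthiers-toolbox | services/api/app/workflow/sessions/store.py | _id_column
-- ===== SOURCE A (Python) =====
-- from typing import Any, Dict, List, Optional, Tuple
--
-- def _id_column(cols: List[str]) -> str:
--     # Tolerate either name (session_id is from our migration)
--     if "workflow_session_id" in cols:
--         return "workflow_session_id"
--     if "session_id" in cols:
--         return "session_id"
--     # fallback to first plausible PK-ish column
--     for c in cols:
--         if c.endswith("_id"):
--             return c
--     raise RuntimeError("No id column found in workflow_sessions table.")
-- ===== SOURCE B (Python) =====
-- def _id_column(cols):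
--     has_ws = False
--     has_s = False
--     first_id = None
--     for c in cols:
--         if c == "workflow_session_id":
--             has_ws = True
--         if c == "session_id":
--             has_s = True
--         if first_id is None and c.endswith("_id"):
--             first_id = c
--     if has_ws:
--         return "workflow_session_id"
--     if has_s:
--         return "session_id"
--     if first_id is not None:
--         return first_id
--     raise RuntimeError("No id column found in workflow_sessions table.")
-- ===== Notes on version B (the rewrite author's own statement) =====
-- stated objective: alternative
-- what changed: Replaces A's three separate scans (two membership tests then a fallback loop) by a single pass maintaining two flags and the first '_id'-suffixed column, with priority resolved after the loop.
import Mathlib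
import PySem

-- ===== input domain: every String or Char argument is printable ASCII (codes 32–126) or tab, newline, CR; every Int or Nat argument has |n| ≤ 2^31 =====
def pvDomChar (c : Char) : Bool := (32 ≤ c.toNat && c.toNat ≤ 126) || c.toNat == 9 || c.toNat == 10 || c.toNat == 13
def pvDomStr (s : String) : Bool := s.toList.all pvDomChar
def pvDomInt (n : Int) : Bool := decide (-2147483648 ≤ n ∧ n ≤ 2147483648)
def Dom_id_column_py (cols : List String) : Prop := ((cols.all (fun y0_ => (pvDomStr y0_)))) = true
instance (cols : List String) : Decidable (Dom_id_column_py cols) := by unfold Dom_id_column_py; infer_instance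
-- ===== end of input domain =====

-- B replaces A's three separate scans by a single pass keeping two flags and the
-- first '_id'-suffixed column; same result on every input where A returns.

-- ===== PORT A =====
-- A's fallback for-loop: first column ending in "_id", none if the loop falls through (then A raises)
def idFallbackA : List String → Option String
  | [] => none
  | c :: rest => if PySem.Str.endswith c "_id" then some c else idFallbackA rest

def id_column_py (cols : List String) : String :=
  if "workflow_session_id" ∈ cols then "workflow_session_id"
  else if "session_id" ∈ cols then "session_id"
  else (idFallbackA cols).getD ""   -- none: A raises RuntimeError; excluded by Pre_

-- ===== PORT B =====
-- one step of B's single pass: (has_ws, has_s, first_id)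
def idStepB (st : Bool × Bool × Option String) (c : String) : Bool × Bool × Option String :=
  ( st.1 || c == "workflow_session_id",
    st.2.1 || c == "session_id",
    if st.2.2.isNone && PySem.Str.endswith c "_id" then some c else st.2.2 )

def id_column_py_alt (cols : List String) : String :=
  let st := cols.foldl idStepB (false, false, none)
  if st.1 then "workflow_session_id"
  else if st.2.1 then "session_id"
  else match st.2.2 with
    | some c => c
    | none => ""   -- B raises RuntimeError here; excluded by Pre_

-- ===== PRECONDITION & SPEC =====
-- Pre_ excludes exactly the inputs with no id-like column, on which both A and B raise RuntimeError.
def Pre_id_column_py (cols : List String) : Prop :=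
  "workflow_session_id" ∈ cols ∨ "session_id" ∈ cols ∨ ∃ c ∈ cols, PySem.Str.endswith c "_id" = true
instance (cols : List String) : Decidable (Pre_id_column_py cols) := by unfold Pre_id_column_py; infer_instance
def pvWitness_id_column_py : List String := ["session_id", "foo"]

def Spec_id_column_py (cols : List String) (out : String) : Prop := out = id_column_py_alt cols
instance (cols : List String) (out : String) : Decidable (Spec_id_column_py cols out) := by unfold Spec_id_column_py; infer_instance

-- ===== CLAIM (what is proved, stated in full; the proofs are below) =====
def Claim_equal_id_column_py : Prop := ∀ (cols : List String), Dom_id_column_py cols → Pre_id_column_py cols → Spec_id_column_py cols (id_column_py cols)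

-- ===== LEMMAS AND PROOFS =====
-- characterisation of B's fold: the flags are memberships, first_id is A's fallback result
theorem idFold_char (cols : List String) (a b : Bool) (o : Option String) :
    cols.foldl idStepB (a, b, o) =
      (a || decide ("workflow_session_id" ∈ cols),
       b || decide ("session_id" ∈ cols),
       match o with | some x => some x | none => idFallbackA cols) := by
  induction cols generalizing a b o with
  | nil => cases o <;> simp [idFallbackA]
  | cons c rest ih =>
    simp only [List.foldl_cons, idStepB, ih, idFallbackA, List.mem_cons]
    cases o with
    | some x =>
      simp [Bool.or_assoc, beq_eq_decide, eq_comm]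
    | none =>
      simp only [Prod.mk.injEq]
      refine ⟨?_, ?_, ?_⟩
      · simp [Bool.or_assoc, beq_eq_decide, eq_comm]
      · simp [Bool.or_assoc, beq_eq_decide, eq_comm]
      · by_cases h : PySem.Chars.endswith c.toList ['_','i','d'] = true <;> simp [h]

-- ===== VERDICT (by name: the statement is the Claim_ definition above) =====
theorem id_column_py_spec : Claim_equal_id_column_py := by
  intro cols _ _
  unfold Spec_id_column_py id_column_py id_column_py_alt
  rw [idFold_char]
  by_cases h1 : "workflow_session_id" ∈ cols <;> by_cases h2 : "session_id" ∈ cols <;>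
    simp [h1, h2] <;> cases idFallbackA cols <;> simp
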